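-- pv_equiv track=rewrite | github.com/karikris/intermine314 | benchmarking/bench_pages.py | _is_alignment_row
-- ===== SOURCE A (Python) =====
-- def _is_alignment_row(cells: list[str]) -> bool:
--     if not cells:
--         return False
--     for cell in cells:
--         token = cell.replace("-", "").replace(":", "").strip()
--         if token:
--             return False
--     return True
-- ===== SOURCE B (Python) =====
-- def _is_alignment_row(cells: list[str]) -> bool:
--     if not cells:
--         return False
--     return set("".join(cells)) <= set("-: \t\n\x0b\x0c\r")
-- ===== Notes on version B (the rewrite author's own statement) =====
-- stated objective: idiomatic
-- what changed: Instead of transforming each cell with replace/replace/strip and testing for leftovers cell by cell, B joins the row once and reduces it to its set of distinct characters, deciding by a single set-inclusion test against the allowed alphabet '-: \t\n\x0b\x0c\r' (equal to A on the printable-ASCII domain).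
import Mathlib
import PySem

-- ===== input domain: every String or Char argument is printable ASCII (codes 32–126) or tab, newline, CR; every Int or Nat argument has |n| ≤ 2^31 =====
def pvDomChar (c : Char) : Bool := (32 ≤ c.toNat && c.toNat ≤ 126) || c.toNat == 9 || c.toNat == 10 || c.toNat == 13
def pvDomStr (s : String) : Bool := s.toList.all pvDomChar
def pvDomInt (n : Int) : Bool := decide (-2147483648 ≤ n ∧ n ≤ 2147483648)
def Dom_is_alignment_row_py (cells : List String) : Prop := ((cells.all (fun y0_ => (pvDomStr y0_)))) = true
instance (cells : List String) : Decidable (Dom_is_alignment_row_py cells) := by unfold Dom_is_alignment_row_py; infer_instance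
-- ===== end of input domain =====

-- B replaces A's per-cell replace/replace/strip transform with a whole-row aggregation:
-- join the row once, collect its set of distinct characters, and decide by one
-- set-inclusion test against the allowed alphabet (idiomatic; equal to A on Dom).

-- ===== PORT A =====
-- the for-loop over cells (returns False on the first cell whose transformed token is non-empty)
def isAlignLoopA (cells : List String) : Bool :=
  match cells with
  | [] => true
  | cell :: rest =>
    let token := PySem.Str.strip (PySem.Str.replace (PySem.Str.replace cell "-" "") ":" "")
    if token ≠ "" then false else isAlignLoopA rest

def is_alignment_row_py (cells : List String) : Bool :=
  if cells = [] then false else isAlignLoopA cells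

-- ===== PORT B =====
def is_alignment_row_py_alt (cells : List String) : Bool :=
  if cells = [] then false
  else
    PySem.Set.issubset (PySem.Set.ofList (PySem.Str.join "" cells).toList)
      (PySem.Set.ofList "-: \t\n\u000B\u000C\r".toList)

-- ===== PRECONDITION & SPEC =====
def Spec_is_alignment_row_py (cells : List String) (out : Bool) : Prop := out = is_alignment_row_py_alt cells
instance (cells : List String) (out : Bool) : Decidable (Spec_is_alignment_row_py cells out) := by unfold Spec_is_alignment_row_py; infer_instance

-- ===== CLAIM (what is proved, stated in full; the proofs are below) =====
def Claim_equal_is_alignment_row_py : Prop := ∀ (cells : List String), Dom_is_alignment_row_py cells → Spec_is_alignment_row_py cells (is_alignment_row_py cells)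

-- ===== LEMMAS AND PROOFS =====

-- replace with a single-char pattern and empty replacement is filter
theorem replace_go_single (a : Char) :
    ∀ (fuel : Nat) (l acc : List Char), l.length ≤ fuel →
      PySem.Chars.replace.go [a] [] fuel l acc = acc.reverse ++ l.filter (fun c => c != a) := by
  intro fuel
  induction fuel with
  | zero =>
    intro l acc h
    have : l = [] := List.eq_nil_of_length_eq_zero (Nat.le_zero.mp h)
    subst this
    simp [PySem.Chars.replace.go]
  | succ n ih =>
    intro l acc h
    cases l with
    | nil => simp [PySem.Chars.replace.go]
    | cons c t =>
      by_cases hc : a = c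
      · subst hc
        have hpre : [a].isPrefixOf (a :: t) = true := by simp [List.isPrefixOf]
        simp only [PySem.Chars.replace.go, hpre, if_pos, List.length_cons, List.length_nil,
          List.drop_succ_cons, List.drop_zero, List.reverse_nil, List.nil_append]
        rw [ih t acc (by simpa using Nat.le_of_succ_le_succ h)]
        simp
      · have hpre : [a].isPrefixOf (c :: t) = false := by
          simp [List.isPrefixOf]
          intro h'
          exact hc h'
        have hca : c ≠ a := Ne.symm hc
        simp only [PySem.Chars.replace.go, hpre, Bool.false_eq_true, if_false]
        rw [ih t (c :: acc) (by simpa using Nat.le_of_succ_le_succ h)]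
        simp [hca]

theorem replace_single (a : Char) (s : List Char) :
    PySem.Chars.replace s [a] [] = s.filter (fun c => c != a) := by
  have := replace_go_single a s.length s [] (le_refl _)
  simpa [PySem.Chars.replace] using this

-- strip is empty iff every character is whitespace
theorem strip_eq_nil_iff (s : List Char) :
    PySem.Chars.strip s = [] ↔ s.all PySem.Chars.isspace = true := by
  unfold PySem.Chars.strip PySem.Chars.rstrip PySem.Chars.lstrip
  constructor
  · intro h
    have h' : (s.dropWhile PySem.Chars.isspace).reverse.dropWhile PySem.Chars.isspace = [] := by
      simpa using congrArg List.reverse h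
    have hall : ∀ x ∈ (s.dropWhile PySem.Chars.isspace).reverse, PySem.Chars.isspace x := by
      intro x hx
      exact List.dropWhile_eq_nil_iff.mp h' x hx
    simp only [List.all_eq_true]
    intro x hx
    have : x ∈ s.takeWhile PySem.Chars.isspace ++ s.dropWhile PySem.Chars.isspace := by
      rw [List.takeWhile_append_dropWhile]; exact hx
    rcases List.mem_append.mp this with h1 | h2
    · exact List.mem_takeWhile_imp h1
    · exact hall x (List.mem_reverse.mpr h2)
  · intro h
    have : s.dropWhile PySem.Chars.isspace = [] := by
      apply List.dropWhile_eq_nil_iff.mpr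
      intro x hx; exact List.all_eq_true.mp h x hx
    simp [this]

-- the per-cell characterization: A's transformed token is empty iff every character
-- of the cell is '-', ':' or whitespace
theorem token_empty_iff (s : List Char) :
    PySem.Chars.strip (PySem.Chars.replace (PySem.Chars.replace s ['-'] []) [':'] []) = [] ↔
      s.all (fun ch => ['-', ':'].contains ch || PySem.Chars.isspace ch) = true := by
  rw [replace_single, replace_single, strip_eq_nil_iff]
  simp only [List.all_eq_true, List.mem_filter]
  constructor
  · intro h x hx
    by_cases h1 : x = '-'
    · simp [h1]
    · by_cases h2 : x = ':'
      · simp [h2]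
      · have := h x ⟨⟨hx, by simp [bne, h1]⟩, by simp [bne, h2]⟩
        simp [this]
  · intro h x hx
    obtain ⟨⟨hxs, hx1⟩, hx2⟩ := hx
    have := h x hxs
    simp only [List.contains_eq_mem, List.mem_cons, List.not_mem_nil, or_false, decide_eq_true_eq,
      Bool.or_eq_true] at this
    rcases this with (h' | h') | h'
    · exact absurd h' (by simpa [bne] using hx1)
    · exact absurd h' (by simpa [bne] using hx2)
    · exact h'

-- Str-level form of the per-cell test
theorem str_token_empty_iff (cell : String) :
    ((PySem.Str.strip (PySem.Str.replace (PySem.Str.replace cell "-" "") ":" "")) = "") ↔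
      cell.toList.all (fun ch => ['-', ':'].contains ch || PySem.Chars.isspace ch) = true := by
  rw [Iff.symm String.toList_eq_nil_iff]
  simp only [PySem.Str.toList_strip, PySem.Str.toList_replace]
  have : ("-" : String).toList = ['-'] ∧ (":" : String).toList = [':'] ∧
      ("" : String).toList = [] := by decide
  rw [this.1, this.2.1, this.2.2, token_empty_iff]

-- A's loop over the cells as an all() over the same per-character predicate
theorem loopA_eq_all (cells : List String) :
    isAlignLoopA cells =
      cells.all (fun cell => cell.toList.all (fun ch => ['-', ':'].contains ch || PySem.Chars.isspace ch)) := by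
  induction cells with
  | nil => simp [isAlignLoopA]
  | cons cell rest ih =>
    simp only [isAlignLoopA, List.all_cons]
    by_cases h : PySem.Str.strip (PySem.Str.replace (PySem.Str.replace cell "-" "") ":" "") = ""
    · rw [if_neg (by simp [h]), ih, (str_token_empty_iff cell).mp h, Bool.true_and]
    · rw [if_pos (by simpa using h)]
      cases hb : cell.toList.all (fun ch => ['-', ':'].contains ch || PySem.Chars.isspace ch) with
      | false => rw [Bool.false_and]
      | true => exact absurd ((str_token_empty_iff cell).mpr hb) h

-- joining with the empty separator flattens
theorem join_nil_eq_flatten (parts : List (List Char)) :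
    PySem.Chars.join [] parts = parts.flatten := by
  show List.intercalate [] parts = parts.flatten
  induction parts with
  | nil => simp [List.intercalate]
  | cons h t ih =>
    cases t with
    | nil => simp [List.intercalate]
    | cons h2 t2 =>
      simp [List.intercalate] at ih ⊢
      simpa using ih

-- on the printable-ASCII domain, "'-' or ':' or whitespace" is exactly membership in B's alphabet
theorem char_pred_eq (ch : Char) (h : pvDomChar ch = true) :
    (['-', ':'].contains ch || PySem.Chars.isspace ch) =
      ("-: \t\n\u000B\u000C\r" : String).toList.contains ch := by
  have halpha : ("-: \t\n\u000B\u000C\r" : String).toList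
      = ['-', ':', ' ', '\t', '\n', '\u000B', '\u000C', '\r'] := by decide
  rw [halpha]
  have htn : ∀ c : Char, ch = c ↔ ch.toNat = c.toNat := by
    intro c
    constructor
    · intro h'; rw [h']
    · intro h'; exact Char.ext (UInt32.toNat_inj.mp h')
  simp only [pvDomChar, Bool.or_eq_true, Bool.and_eq_true, decide_eq_true_eq, beq_iff_eq] at h
  simp only [List.contains_eq_mem, List.mem_cons, List.not_mem_nil, or_false,
    PySem.Chars.isspace, htn]
  set n := ch.toNat
  have : ('-').toNat = 45 ∧ (':').toNat = 58 ∧ (' ').toNat = 32 ∧ ('\t').toNat = 9 ∧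
      ('\n').toNat = 10 ∧ ('\u000B').toNat = 11 ∧ ('\u000C').toNat = 12 ∧ ('\r').toNat = 13 := by
    decide
  obtain ⟨e1, e2, e3, e4, e5, e6, e7, e8⟩ := this
  rw [e1, e2, e3, e4, e5, e6, e7, e8, Bool.eq_iff_iff]
  simp only [Bool.or_eq_true, Bool.and_eq_true, decide_eq_true_eq]
  omega

-- ===== VERDICT (by name: the statement is the Claim_ definition above) =====
theorem is_alignment_row_py_spec : Claim_equal_is_alignment_row_py := by
  intro cells hdom
  unfold Spec_is_alignment_row_py is_alignment_row_py is_alignment_row_py_alt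
  by_cases h : cells = []
  · simp [h]
  · rw [if_neg h, if_neg h, loopA_eq_all]
    have hsub : PySem.Set.issubset (PySem.Set.ofList (PySem.Str.join "" cells).toList)
          (PySem.Set.ofList ("-: \t\n\u000B\u000C\r" : String).toList) = true ↔
        ∀ ch ∈ (PySem.Str.join "" cells).toList,
          ch ∈ ("-: \t\n\u000B\u000C\r" : String).toList := by
      rw [PySem.Set.issubset_iff]
      constructor
      · intro hs ch hch
        exact (PySem.Set.mem_ofList _ _).mp (hs ch ((PySem.Set.mem_ofList _ _).mpr hch))
      · intro hs ch hch
        exact (PySem.Set.mem_ofList _ _).mpr (hs ch ((PySem.Set.mem_ofList _ _).mp hch))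
    have hjoin : (PySem.Str.join "" cells).toList = (cells.map String.toList).flatten := by
      rw [PySem.Str.toList_join]
      have : ("" : String).toList = [] := by decide
      rw [this, join_nil_eq_flatten]
    unfold Dom_is_alignment_row_py at hdom
    simp only [List.all_eq_true, pvDomStr] at hdom
    have key : (cells.all (fun cell => cell.toList.all
          (fun ch => ['-', ':'].contains ch || PySem.Chars.isspace ch)) = true) ↔
        ∀ ch ∈ (PySem.Str.join "" cells).toList,
          ch ∈ ("-: \t\n\u000B\u000C\r" : String).toList := by
      rw [hjoin]
      simp only [List.all_eq_true, List.mem_flatten, List.mem_map]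
      constructor
      · intro hall ch ⟨l, ⟨cell, hcell, hl⟩, hchl⟩
        subst hl
        have hd := hdom cell hcell ch hchl
        have := hall cell hcell ch hchl
        rw [char_pred_eq ch hd] at this
        exact List.contains_iff_mem.mp this
      · intro hall cell hcell ch hch
        have hd := hdom cell hcell ch hch
        rw [char_pred_eq ch hd]
        exact List.contains_iff_mem.mpr (hall ch ⟨cell.toList, ⟨cell, hcell, rfl⟩, hch⟩)
    cases hb : cells.all (fun cell => cell.toList.all
        (fun ch => ['-', ':'].contains ch || PySem.Chars.isspace ch)) with
    | true => exact (hsub.mpr (key.mp hb)).symm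
    | false =>
      cases hs : PySem.Set.issubset (PySem.Set.ofList (PySem.Str.join "" cells).toList)
          (PySem.Set.ofList ("-: \t\n\u000B\u000C\r" : String).toList) with
      | false => rfl
      | true => exact absurd (key.mpr (hsub.mp hs)) (ne_true_of_eq_false hb)
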